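-- pv_equiv track=rewrite | github.com/Adithya-14/Project | Intermediate/SameDigits.py | same_digits
-- ===== SOURCE A (Python) =====
-- def same_digits(n):
--     n1=n
--     n2=n
--     count=0
--     while n>0:
--         digit=n%10
--         n//=10
--         count+=1
--     while n1>0:
--         digit=n1%10
--         n1//=10
--         if digit==count:
--             return f"{n2} does not have {count} same digits"
--     return f"{n2} has {count} same digits"
-- ===== SOURCE B (Python) =====
-- def same_digits(n):
--     # One fused recursive pass: descend stripping digits to learn the total
--     # count, then on the way back up check each digit against that total.
--     def scan(m, k):
--         if m <= 0:
--             return k, False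
--         total, found = scan(m // 10, k + 1)
--         return total, found or m % 10 == total
--     count, found = scan(n, 0)
--     if found:
--         return f"{n} does not have {count} same digits"
--     return f"{n} has {count} same digits"
-- ===== Notes on version B (the rewrite author's own statement) =====
-- stated objective: alternative
-- what changed: Replaces A's two staged while-loops (first count all digits, then rescan the digits with an early return on a match) by a single fused recursive pass that computes the digit count on the way down and checks each digit against the final total on the way back up, accumulating the match with a boolean 'or'.
import Mathlib
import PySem

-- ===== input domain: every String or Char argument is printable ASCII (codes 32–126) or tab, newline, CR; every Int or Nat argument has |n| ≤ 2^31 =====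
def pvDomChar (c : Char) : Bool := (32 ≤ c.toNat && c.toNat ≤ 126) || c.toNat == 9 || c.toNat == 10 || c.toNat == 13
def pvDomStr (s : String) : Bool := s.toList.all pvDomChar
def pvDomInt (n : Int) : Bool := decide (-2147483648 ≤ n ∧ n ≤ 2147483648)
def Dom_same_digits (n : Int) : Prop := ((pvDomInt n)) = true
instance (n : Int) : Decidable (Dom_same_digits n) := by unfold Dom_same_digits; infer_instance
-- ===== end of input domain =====

-- B fuses A's two staged while-loops into one recursive pass (count on descent,
-- check each digit against the total on unwind); objective: alternative, same cost.


-- ===== PORT A =====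
-- termination helper for the loops/recursion (cited by name in decreasing_by)
theorem pv_fdiv_lt (n : Int) (_h : 0 < n) :
    (PySem.Int.floordiv n 10).toNat < n.toNat := by
  simp only [PySem.Int.floordiv, Int.fdiv_eq_ediv_of_nonneg n (by norm_num : (0:Int) ≤ 10)]
  omega

-- first while-loop of A: counts the digits
def pvCountLoop (n count : Int) : Int :=
  if h : 0 < n then
    let _digit := PySem.Int.mod n 10
    pvCountLoop (PySem.Int.floordiv n 10) (count + 1)
  else count
termination_by n.toNat
decreasing_by exact pv_fdiv_lt n h

-- second while-loop of A: scans the digits again, early return on digit == count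
def pvCheckLoop (n1 count n2 : Int) : String :=
  if h : 0 < n1 then
    let digit := PySem.Int.mod n1 10
    let n1' := PySem.Int.floordiv n1 10
    if digit = count then
      PySem.Int.toStr n2 ++ " does not have " ++ PySem.Int.toStr count ++ " same digits"
    else
      pvCheckLoop n1' count n2
  else
    PySem.Int.toStr n2 ++ " has " ++ PySem.Int.toStr count ++ " same digits"
termination_by n1.toNat
decreasing_by exact pv_fdiv_lt n1 h

def same_digits (n : Int) : String :=
  pvCheckLoop n (pvCountLoop n 0) n

-- ===== PORT B =====
-- B's fused recursive scan: (final digit count, whether some digit equals it)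
def pvScan (m k : Int) : Int × Bool :=
  if h : 0 < m then
    let r := pvScan (PySem.Int.floordiv m 10) (k + 1)
    (r.1, r.2 || decide (PySem.Int.mod m 10 = r.1))
  else (k, false)
termination_by m.toNat
decreasing_by exact pv_fdiv_lt m h

def same_digits_alt (n : Int) : String :=
  let r := pvScan n 0
  if r.2 then
    PySem.Int.toStr n ++ " does not have " ++ PySem.Int.toStr r.1 ++ " same digits"
  else
    PySem.Int.toStr n ++ " has " ++ PySem.Int.toStr r.1 ++ " same digits"

-- ===== PRECONDITION & SPEC =====
def Spec_same_digits (n : Int) (out : String) : Prop := out = same_digits_alt n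
instance (n : Int) (out : String) : Decidable (Spec_same_digits n out) := by unfold Spec_same_digits; infer_instance

-- ===== CLAIM (what is proved, stated in full; the proofs are below) =====
def Claim_equal_same_digits : Prop := ∀ (n : Int), Dom_same_digits n → Spec_same_digits n (same_digits n)

-- ===== LEMMAS AND PROOFS =====

theorem pv_floordiv_toNat (n : Int) (h : 0 < n) :
    PySem.Int.floordiv n 10 = ((n.toNat / 10 : Nat) : Int) := by
  simp only [PySem.Int.floordiv, Int.fdiv_eq_ediv_of_nonneg n (by norm_num : (0:Int) ≤ 10)]
  omega

theorem pv_fmod_toNat (n : Int) (h : 0 < n) :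
    PySem.Int.mod n 10 = ((n.toNat % 10 : Nat) : Int) := by
  simp only [PySem.Int.mod, Int.fmod_eq_emod_of_nonneg n (by norm_num : (0:Int) ≤ 10)]
  omega

-- A's first loop computes the number of digits
theorem pv_countLoop_eq (m : Nat) : ∀ count : Int,
    pvCountLoop (m : Int) count = count + ((Nat.digits 10 m).length : Int) := by
  induction m using Nat.strong_induction_on with
  | _ m ih =>
    intro count
    rw [pvCountLoop]
    by_cases h0 : 0 < m
    · rw [dif_pos (by exact_mod_cast h0)]
      rw [pv_floordiv_toNat _ (by exact_mod_cast h0)]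
      simp only [Int.toNat_natCast]
      rw [ih (m / 10) (Nat.div_lt_self h0 (by norm_num))]
      rw [Nat.digits_def' (by norm_num : 1 < 10) h0]
      simp; omega
    · have hm : m = 0 := by omega
      subst hm
      rw [dif_neg (by norm_num)]
      simp

-- A's second loop is a membership test on the digit list
theorem pv_checkLoop_eq (m : Nat) : ∀ (count n2 : Int),
    pvCheckLoop (m : Int) count n2 =
      if count ∈ (Nat.digits 10 m).map (fun (d : Nat) => (d : Int)) then
        PySem.Int.toStr n2 ++ " does not have " ++ PySem.Int.toStr count ++ " same digits"
      else
        PySem.Int.toStr n2 ++ " has " ++ PySem.Int.toStr count ++ " same digits" := by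
  induction m using Nat.strong_induction_on with
  | _ m ih =>
    intro count n2
    rw [pvCheckLoop]
    by_cases h0 : 0 < m
    · rw [dif_pos (by exact_mod_cast h0)]
      simp only [pv_fmod_toNat _ (by exact_mod_cast h0 : (0:Int) < (m:Int)),
        pv_floordiv_toNat _ (by exact_mod_cast h0 : (0:Int) < (m:Int)), Int.toNat_natCast]
      rw [Nat.digits_def' (by norm_num : 1 < 10) h0]
      by_cases he : ((m % 10 : Nat) : Int) = count
      · rw [if_pos he, if_pos (by simp [he.symm])]
      · rw [if_neg he, ih (m / 10) (Nat.div_lt_self h0 (by norm_num))]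
        have hiff : count ∈ (m % 10 :: Nat.digits 10 (m / 10)).map (fun (d : Nat) => (d : Int)) ↔
            count ∈ (Nat.digits 10 (m / 10)).map (fun (d : Nat) => (d : Int)) := by
          simp only [List.map_cons, List.mem_cons]
          constructor
          · rintro (h | h)
            · exact absurd h.symm he
            · exact h
          · exact Or.inr
        by_cases hc : count ∈ (Nat.digits 10 (m / 10)).map (fun (d : Nat) => (d : Int))
        · rw [if_pos hc, if_pos (hiff.mpr hc)]
        · rw [if_neg hc, if_neg (fun h => hc (hiff.mp h))]
    · have hm : m = 0 := by omega
      subst hm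
      rw [dif_neg (by norm_num)]
      simp

-- B's fused scan: total = k + digit count, found = membership of the total
theorem pv_scan_eq (m : Nat) : ∀ k : Int,
    pvScan (m : Int) k =
      (k + ((Nat.digits 10 m).length : Int),
       decide ((k + ((Nat.digits 10 m).length : Int)) ∈
         (Nat.digits 10 m).map (fun (d : Nat) => (d : Int)))) := by
  induction m using Nat.strong_induction_on with
  | _ m ih =>
    intro k
    rw [pvScan]
    by_cases h0 : 0 < m
    · rw [dif_pos (by exact_mod_cast h0)]
      simp only [pv_fmod_toNat _ (by exact_mod_cast h0 : (0:Int) < (m:Int)),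
        pv_floordiv_toNat _ (by exact_mod_cast h0 : (0:Int) < (m:Int)), Int.toNat_natCast]
      rw [ih (m / 10) (Nat.div_lt_self h0 (by norm_num))]
      rw [Nat.digits_def' (by norm_num : 1 < 10) h0]
      simp only [List.length_cons, List.map_cons, List.mem_cons]
      rw [Prod.mk.injEq]
      refine ⟨by push_cast; ring, ?_⟩
      · have hlen : k + 1 + ((Nat.digits 10 (m / 10)).length : Int)
            = k + (((Nat.digits 10 (m / 10)).length : Nat) + 1 : Nat) := by push_cast; ring
        rw [hlen, Bool.decide_or, Bool.or_comm]
        congr 1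
        exact decide_eq_decide.mpr eq_comm
    · have hm : m = 0 := by omega
      subst hm
      rw [dif_neg (by norm_num)]
      simp

-- ===== VERDICT (by name: the statement is the Claim_ definition above) =====
theorem same_digits_spec : Claim_equal_same_digits := by
  intro n _
  unfold Spec_same_digits same_digits same_digits_alt
  by_cases h : 0 < n
  · have hn : n = ((n.toNat : Nat) : Int) := by omega
    conv_lhs => rw [hn]
    conv_rhs => rw [hn]
    rw [pv_countLoop_eq, pv_checkLoop_eq, pv_scan_eq]
    simp only [zero_add]
    by_cases hmem : (((Nat.digits 10 n.toNat).length : Int)) ∈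
        (Nat.digits 10 n.toNat).map (fun (d : Nat) => (d : Int))
    · simp [hmem]
    · simp [hmem]
  · rw [pvCountLoop, dif_neg h, pvCheckLoop, dif_neg h, pvScan, dif_neg h]
    simp
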